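-- pv_equiv track=rewrite | github.com/YanisMikulskis/lessons-by-leetcode | contests/q1.py | maxSum
-- ===== SOURCE A (Python) =====
-- def maxSum(nums: list[int]) -> int:
--
--     new_arr = []
--
--     for i in nums:
--         if i not in new_arr:
--             new_arr.append(i)
--     dict_sols = {
--
--     }
--     if all([i > 0 for i in new_arr]):
--         return sum(new_arr)
--
--     elif all([i < 0 for i in new_arr]):
--         return max(new_arr)
--
--     elif any([i >= 0 for i in new_arr]):
--         return sum([i for i in new_arr if i >= 0])
--
--     elif len(new_arr) == 1:
--         return new_arr[0]
-- ===== SOURCE B (Python) =====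
-- def maxSum(nums: list[int]) -> int:
--     # single fused pass: seen-set, running max and sum of distinct nonnegatives
--     seen = set()
--     pos_sum = 0
--     best = None
--     for x in nums:
--         if x in seen:
--             continue
--         seen.add(x)
--         if best is None or x > best:
--             best = x
--         if x >= 0:
--             pos_sum += x
--     return best if best is not None and best < 0 else pos_sum
-- ===== Notes on version B (the rewrite author's own statement) =====
-- stated objective: faster
-- what changed: Replaces A's quadratic membership-test dedup list followed by four staged full-array all/all/any scans with one fused pass over nums maintaining three accumulators (seen set, running max, sum of distinct nonnegatives) and a single final sign test on the running max.
import Mathlib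
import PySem

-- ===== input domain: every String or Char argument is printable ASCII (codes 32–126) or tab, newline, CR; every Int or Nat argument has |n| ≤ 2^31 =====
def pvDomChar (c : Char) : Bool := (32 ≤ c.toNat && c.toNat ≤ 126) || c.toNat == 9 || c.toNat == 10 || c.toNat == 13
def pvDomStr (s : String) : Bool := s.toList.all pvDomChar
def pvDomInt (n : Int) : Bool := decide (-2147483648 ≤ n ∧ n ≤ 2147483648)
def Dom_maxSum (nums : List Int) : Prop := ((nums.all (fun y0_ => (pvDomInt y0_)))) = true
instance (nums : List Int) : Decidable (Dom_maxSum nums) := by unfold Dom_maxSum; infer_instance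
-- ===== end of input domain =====

-- B replaces A's quadratic dedup list and four staged full-array boolean scans with one
-- fused pass keeping (seen set, running max, sum of distinct nonnegatives) (faster).

-- ===== PORT A =====
def maxSum (nums : List Int) : Int :=
  -- for i in nums: if i not in new_arr: new_arr.append(i)
  let new_arr := nums.foldl (fun acc i => if i ∈ acc then acc else acc ++ [i]) []
  if new_arr.all (fun i => decide (i > 0)) then new_arr.sum
  else if new_arr.all (fun i => decide (i < 0)) then
    -- max(new_arr); raises on [] but this branch is unreachable then (all([]) is true above)
    (PySem.List.max? new_arr (fun x => x)).getD 0
  else if new_arr.any (fun i => decide (i ≥ 0)) then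
    (new_arr.filter (fun i => decide (i ≥ 0))).sum
  else if new_arr.length == 1 then (PySem.List.pyGet? new_arr 0).getD 0
  else 0  -- Python falls off the end (None); provably unreachable

-- ===== PORT B =====
-- one pass; state = (seen, pos_sum, best) exactly as in Source B
def maxSumAltStep (st : PySem.Set Int × Int × Option Int) (x : Int) :
    PySem.Set Int × Int × Option Int :=
  if PySem.Set.contains st.1 x then st
  else
    let seen := PySem.Set.add st.1 x
    let best := match st.2.2 with
      | none => some x
      | some b => if x > b then some x else some b
    let pos_sum := if x ≥ 0 then st.2.1 + x else st.2.1
    (seen, pos_sum, best)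

def maxSum_alt (nums : List Int) : Int :=
  let st := nums.foldl maxSumAltStep ((PySem.Set.empty : PySem.Set Int), (0 : Int), none)
  -- best if best is not None and best < 0 else pos_sum
  match st.2.2 with
  | some b => if b < 0 then b else st.2.1
  | none => st.2.1

-- ===== PRECONDITION & SPEC =====
def Spec_maxSum (nums : List Int) (out : Int) : Prop := out = maxSum_alt nums
instance (nums : List Int) (out : Int) : Decidable (Spec_maxSum nums out) := by unfold Spec_maxSum; infer_instance

-- ===== CLAIM (what is proved, stated in full; the proofs are below) =====
def Claim_equal_maxSum : Prop := ∀ (nums : List Int), Dom_maxSum nums → Spec_maxSum nums (maxSum nums)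

-- ===== LEMMAS AND PROOFS =====

-- A's dedup loop builds exactly set(nums) (first occurrences, in order)
theorem dedup_loop_eq_ofList (nums : List Int) :
    nums.foldl (fun acc i => if i ∈ acc then acc else acc ++ [i]) [] = PySem.Set.ofList nums := by
  rw [PySem.Set.ofList_eq_foldl]
  congr 1
  funext acc i
  simp [PySem.Set.add, PySem.Set.contains]

theorem max?_append_singleton (s : List Int) (x : Int) :
    PySem.List.max? (s ++ [x]) (fun y => y) =
      some (match PySem.List.max? s (fun y => y) with
            | none => x
            | some b => if x > b then x else b) := by
  cases s with
  | nil => simp [PySem.List.max?]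
  | cons h t =>
    rw [List.cons_append, PySem.List.max?_id_cons, PySem.List.max?_id_cons]
    simp only [List.foldl_append, List.foldl]
    congr 1
    by_cases hle : x ≤ t.foldl max h
    · rw [max_eq_left hle, if_neg (by omega)]
    · rw [max_eq_right (by omega), if_pos (by omega)]

-- loop invariant: the fused pass, started from any seen-set s with the matching
-- accumulators, ends with set(s ∪ nums), its nonnegative sum and its max
theorem loop_inv (nums : List Int) (s : PySem.Set Int) :
    nums.foldl maxSumAltStep
        (s, ((s : List Int).filter (fun y => decide (y ≥ 0))).sum, PySem.List.max? s (fun y => y))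
      = (PySem.Set.update s nums,
         ((PySem.Set.update s nums : List Int).filter (fun y => decide (y ≥ 0))).sum,
         PySem.List.max? (PySem.Set.update s nums) (fun y => y)) := by
  induction nums generalizing s with
  | nil => simp [PySem.Set.update]
  | cons x rest ih =>
    simp only [List.foldl]
    by_cases hx : x ∈ (s : List Int)
    · have hstep : maxSumAltStep
          (s, ((s : List Int).filter (fun y => decide (y ≥ 0))).sum, PySem.List.max? s (fun y => y)) x
          = (s, ((s : List Int).filter (fun y => decide (y ≥ 0))).sum, PySem.List.max? s (fun y => y)) := by
        simp [maxSumAltStep, PySem.Set.contains, hx]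
      have hadd : PySem.Set.add s x = s := by simp [PySem.Set.add, PySem.Set.contains, hx]
      rw [hstep, ih s]
      simp [PySem.Set.update, PySem.Set.add, PySem.Set.contains, hx]
    · have hadd : PySem.Set.add s x = s ++ [x] := by
        simp [PySem.Set.add, PySem.Set.contains, hx]
      have hstep : maxSumAltStep
          (s, ((s : List Int).filter (fun y => decide (y ≥ 0))).sum, PySem.List.max? s (fun y => y)) x
          = (s ++ [x],
             ((s ++ [x] : List Int).filter (fun y => decide (y ≥ 0))).sum,
             PySem.List.max? (s ++ [x]) (fun y => y)) := by
        simp only [maxSumAltStep, PySem.Set.contains]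
        rw [if_neg (by simpa using hx), hadd]
        refine Prod.ext rfl (Prod.ext ?_ ?_)
        · simp only [List.filter_append, List.sum_append]
          by_cases h0 : x ≥ 0 <;> simp [h0]
        · rw [max?_append_singleton]
          cases hm : PySem.List.max? (s : List Int) (fun y => y) with
          | none => simp
          | some b => simp only; simp only [gt_iff_lt]; split_ifs <;> rfl
      rw [hstep, ih (s ++ [x])]
      have : PySem.Set.update s (x :: rest) = PySem.Set.update (s ++ [x]) rest := by
        simp [PySem.Set.update, hadd]
      rw [this]

-- the fused pass computes (set(nums), nonneg sum, max) over the distinct values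
theorem foldB_eq (nums : List Int) :
    nums.foldl maxSumAltStep ((PySem.Set.empty : PySem.Set Int), (0 : Int), none)
      = (PySem.Set.ofList nums,
         ((PySem.Set.ofList nums : List Int).filter (fun y => decide (y ≥ 0))).sum,
         PySem.List.max? (PySem.Set.ofList nums) (fun y => y)) := by
  have h := loop_inv nums PySem.Set.empty
  have h0 : ((PySem.Set.empty : PySem.Set Int) : List Int) = [] := rfl
  rw [h0] at h
  simpa [PySem.List.max?, PySem.Set.update, PySem.Set.ofList_eq_foldl] using h

theorem filter_nonneg_of_all_pos (u : List Int) (h : u.all (fun i => decide (i > 0)) = true) :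
    u.filter (fun x => decide (x ≥ 0)) = u := by
  apply List.filter_eq_self.mpr
  intro x hx
  have := List.all_eq_true.mp h x hx
  simp at this ⊢; omega

-- ===== VERDICT (by name: the statement is the Claim_ definition above) =====
theorem maxSum_spec : Claim_equal_maxSum := by
  intro nums _
  unfold Spec_maxSum maxSum maxSum_alt
  rw [dedup_loop_eq_ofList, foldB_eq]
  set u := PySem.Set.ofList nums with hu
  by_cases hpos : u.all (fun i => decide (i > 0)) = true
  · -- A: sum(u); B: best is none (u empty) or best ≥ 0, nonnegative sum = sum(u)
    simp only [hpos, if_true]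
    cases hmax : PySem.List.max? u (fun x => x) with
    | none => simp [(PySem.List.max?_eq_none_iff u (fun x => x)).mp hmax]
    | some m =>
      have hm := PySem.List.max?_mem hmax
      have := List.all_eq_true.mp hpos m hm
      simp at this
      show u.sum = if m < 0 then m else (u.filter (fun x => decide (x ≥ 0))).sum
      rw [if_neg (by omega), filter_nonneg_of_all_pos u hpos]
  · have hne : u ≠ [] := by intro h; rw [h] at hpos; simp at hpos
    obtain ⟨m, hmax⟩ : ∃ m, PySem.List.max? u (fun x => x) = some m := by
      cases h : PySem.List.max? u (fun x => x) with
      | none => exact absurd ((PySem.List.max?_eq_none_iff u (fun x => x)).mp h) hne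
      | some m => exact ⟨m, rfl⟩
    have hmmem := PySem.List.max?_mem hmax
    have hmmax := PySem.List.max?_isMax hmax
    simp only [hpos, if_false, hmax, Bool.false_eq_true]
    by_cases hneg : u.all (fun i => decide (i < 0)) = true
    · -- all negative: A returns max, B's best < 0
      have := List.all_eq_true.mp hneg m hmmem
      simp at this
      simp [hneg, this]
    · -- mixed: some element ≥ 0, so the running max is ≥ 0; both return the nonneg sum
      obtain ⟨x, hxmem, hx⟩ : ∃ x ∈ u, ¬ (x < 0) := by
        by_contra h; push Not at h
        exact hneg (List.all_eq_true.mpr (fun x hx => by simp [h x hx]))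
      have hmx := hmmax x hxmem
      have hany : u.any (fun i => decide (i ≥ 0)) = true :=
        List.any_eq_true.mpr ⟨x, hxmem, by simp; omega⟩
      simp only [hneg, if_false, hany, if_true, Bool.false_eq_true]
      show (u.filter (fun i => decide (i ≥ 0))).sum = if m < 0 then m else (u.filter (fun x => decide (x ≥ 0))).sum
      rw [if_neg (by omega)]
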